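-- pv_equiv track=rewrite | github.com/chanokin/bss_mbody | bss_utils.py | output_pairing_connection_list
-- ===== SOURCE A (Python) =====
-- def output_pairing_connection_list(decision_size, neighbour_distance, weight, delay=1):
--     conn_list = []
--     half_dist = neighbour_distance // 2
--     for nid in range(decision_size):
--         for ndist in range(-half_dist, half_dist + 1):
--             neighbour = nid + ndist
--             if neighbour < 0 or ndist == 0 or neighbour >= decision_size:
--                 continue
--             conn_list.append([nid, neighbour, weight, delay])
--
--     return conn_list
-- ===== SOURCE B (Python) =====
-- def output_pairing_connection_list(decision_size, neighbour_distance, weight, delay=1):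
--     # Enumerate diagonal by diagonal (fixed offset d), then sort the rows by
--     # (source, neighbour); keys are distinct so this pins the exact order.
--     # Offsets beyond decision_size - 1 contribute no rows, so the range is clamped.
--     half_dist = neighbour_distance // 2
--     lim = min(half_dist, decision_size - 1)
--     pairs = []
--     for d in [*range(-lim, 0), *range(1, lim + 1)]:
--         for nid in range(max(0, -d), min(decision_size, decision_size - d)):
--             pairs.append([nid, nid + d, weight, delay])
--     pairs.sort(key=lambda r: (r[0], r[1]))
--     return pairs
-- ===== Notes on version B (the rewrite author's own statement) =====
-- stated objective: alternative
-- what changed: B enumerates connections diagonal-by-diagonal (one contiguous run of source indices per fixed offset d, no boundary or self-skip tests inside the loop) and then sorts the rows by the (source, neighbour) key, instead of A's per-neuron scan over relative offsets with three continue-guards.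
import Mathlib
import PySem

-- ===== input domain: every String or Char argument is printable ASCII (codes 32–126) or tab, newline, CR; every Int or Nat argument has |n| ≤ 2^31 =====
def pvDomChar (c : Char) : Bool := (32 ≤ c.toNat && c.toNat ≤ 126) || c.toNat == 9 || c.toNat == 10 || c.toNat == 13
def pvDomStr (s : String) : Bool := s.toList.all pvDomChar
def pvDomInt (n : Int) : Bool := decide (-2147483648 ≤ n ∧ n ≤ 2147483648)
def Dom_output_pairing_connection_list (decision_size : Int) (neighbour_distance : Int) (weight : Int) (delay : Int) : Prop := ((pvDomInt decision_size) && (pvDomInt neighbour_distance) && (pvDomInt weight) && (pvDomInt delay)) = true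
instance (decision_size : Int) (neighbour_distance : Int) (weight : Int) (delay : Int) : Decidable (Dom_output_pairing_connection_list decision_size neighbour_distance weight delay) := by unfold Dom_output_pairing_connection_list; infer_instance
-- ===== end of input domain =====

-- B enumerates connections diagonal-by-diagonal (one contiguous run of sources per fixed
-- offset, no guards in the loop body) and then sorts the rows by (source, neighbour),
-- instead of A's per-neuron scan over relative offsets with three continue-guards (objective: alternative).
-- ===== PORT A =====
def output_pairing_connection_list (decision_size : Int) (neighbour_distance : Int) (weight : Int) (delay : Int) : List (List Int) :=
  let half_dist := PySem.Int.floordiv neighbour_distance 2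
  (PySem.List.pyRange 0 decision_size 1).foldl (fun conn_list nid =>
    (PySem.List.pyRange (-half_dist) (half_dist + 1) 1).foldl (fun conn_list ndist =>
      let neighbour := nid + ndist
      if decide (neighbour < 0) || ndist == 0 || decide (decision_size ≤ neighbour) then conn_list
      else conn_list ++ [[nid, neighbour, weight, delay]]) conn_list) []

-- ===== PORT B =====
def output_pairing_connection_list_alt (decision_size : Int) (neighbour_distance : Int) (weight : Int) (delay : Int) : List (List Int) :=
  let half_dist := PySem.Int.floordiv neighbour_distance 2
  let lim := min half_dist (decision_size - 1)
  let pairs := (PySem.List.pyRange (-lim) 0 1 ++ PySem.List.pyRange 1 (lim + 1) 1).foldl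
    (fun pairs d =>
      (PySem.List.pyRange (max 0 (-d)) (min decision_size (decision_size - d)) 1).foldl
        (fun pairs nid => pairs ++ [[nid, nid + d, weight, delay]]) pairs) []
  PySem.List.sorted2 pairs (fun r => PySem.List.pyGetD r 0 0) (fun r => PySem.List.pyGetD r 1 0)

-- ===== PRECONDITION & SPEC =====
def Spec_output_pairing_connection_list (decision_size : Int) (neighbour_distance : Int) (weight : Int) (delay : Int) (out : List (List Int)) : Prop := out = output_pairing_connection_list_alt decision_size neighbour_distance weight delay
instance (decision_size : Int) (neighbour_distance : Int) (weight : Int) (delay : Int) (out : List (List Int)) : Decidable (Spec_output_pairing_connection_list decision_size neighbour_distance weight delay out) := by unfold Spec_output_pairing_connection_list; infer_instance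

-- ===== CLAIM (what is proved, stated in full; the proofs are below) =====
def Claim_equal_output_pairing_connection_list : Prop := ∀ (decision_size : Int) (neighbour_distance : Int) (weight : Int) (delay : Int), Dom_output_pairing_connection_list decision_size neighbour_distance weight delay → Spec_output_pairing_connection_list decision_size neighbour_distance weight delay (output_pairing_connection_list decision_size neighbour_distance weight delay)

-- ===== LEMMAS AND PROOFS =====

-- the rows of A, as a flatMap over sources of the filtered offset window
def pvAFlat (ds h w dl : Int) : List (List Int) :=
  (PySem.List.pyRange 0 ds 1).flatMap (fun i =>
    ((PySem.List.pyRange (-h) (h + 1) 1).filter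
      (fun t => !(decide (i + t < 0) || t == 0 || decide (ds ≤ i + t)))).map
      (fun t => [i, i + t, w, dl]))

-- the unsorted rows of B, as a flatMap over offsets of the contiguous source run
def pvBRaw (ds h w dl : Int) : List (List Int) :=
  (PySem.List.pyRange (-(min h (ds - 1))) 0 1 ++ PySem.List.pyRange 1 (min h (ds - 1) + 1) 1).flatMap (fun d =>
    (PySem.List.pyRange (max 0 (-d)) (min ds (ds - d)) 1).map (fun i => [i, i + d, w, dl]))

-- B's sort key, packaged as a lexicographic pair
def pvKeyL (r : List Int) : Lex (Int × Int) :=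
  toLex (PySem.List.pyGetD r 0 0, PySem.List.pyGetD r 1 0)

-- the (offset, source) measure under which B's raw list is strictly increasing
def pvKeyM (r : List Int) : Lex (Int × Int) :=
  toLex (PySem.List.pyGetD r 1 0 - PySem.List.pyGetD r 0 0, PySem.List.pyGetD r 0 0)

theorem pvGet0 (a b c d : Int) : PySem.List.pyGetD [a, b, c, d] 0 0 = a := rfl
theorem pvGet1 (a b c d : Int) : PySem.List.pyGetD [a, b, c, d] 1 0 = b := rfl

theorem pvA_eq (ds nd w dl : Int) :
    output_pairing_connection_list ds nd w dl = pvAFlat ds (PySem.Int.floordiv nd 2) w dl := by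
  unfold output_pairing_connection_list pvAFlat
  have hin : ∀ (acc : List (List Int)) (i : Int),
      (PySem.List.pyRange (-(PySem.Int.floordiv nd 2)) (PySem.Int.floordiv nd 2 + 1) 1).foldl
        (fun conn_list ndist =>
          if decide (i + ndist < 0) || ndist == 0 || decide (ds ≤ i + ndist) then conn_list
          else conn_list ++ [[i, i + ndist, w, dl]]) acc
      = acc ++ ((PySem.List.pyRange (-(PySem.Int.floordiv nd 2)) (PySem.Int.floordiv nd 2 + 1) 1).filter
          (fun t => !(decide (i + t < 0) || t == 0 || decide (ds ≤ i + t)))).map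
          (fun t => [i, i + t, w, dl]) := by
    intro acc i
    rw [← PySem.List.foldl_append_if
        (fun t => !(decide (i + t < 0) || t == 0 || decide (ds ≤ i + t)))
        (fun t => [i, i + t, w, dl])]
    exact PySem.List.foldl_congr_mem _ _ _ _ (fun acc t _ => by
      cases hb : (decide (i + t < 0) || t == 0 || decide (ds ≤ i + t)) <;> simp [hb])
  rw [PySem.List.foldl_congr_mem _ _
      (fun acc i => acc ++ ((PySem.List.pyRange (-(PySem.Int.floordiv nd 2)) (PySem.Int.floordiv nd 2 + 1) 1).filter
          (fun t => !(decide (i + t < 0) || t == 0 || decide (ds ≤ i + t)))).map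
          (fun t => [i, i + t, w, dl])) []
      (fun acc i _ => hin acc i)]
  exact PySem.List.foldl_append_eq_flatMap _ _ []

theorem pvB_eq (ds nd w dl : Int) :
    output_pairing_connection_list_alt ds nd w dl
      = PySem.List.sorted2 (pvBRaw ds (PySem.Int.floordiv nd 2) w dl)
          (fun r => PySem.List.pyGetD r 0 0) (fun r => PySem.List.pyGetD r 1 0) := by
  have hpairs : (PySem.List.pyRange (-(min (PySem.Int.floordiv nd 2) (ds - 1))) 0 1 ++
        PySem.List.pyRange 1 (min (PySem.Int.floordiv nd 2) (ds - 1) + 1) 1).foldl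
      (fun pairs d =>
        (PySem.List.pyRange (max 0 (-d)) (min ds (ds - d)) 1).foldl
          (fun pairs nid => pairs ++ [[nid, nid + d, w, dl]]) pairs) []
      = pvBRaw ds (PySem.Int.floordiv nd 2) w dl := by
    unfold pvBRaw
    rw [PySem.List.foldl_congr_mem _ _
        (fun acc d => acc ++ (PySem.List.pyRange (max 0 (-d)) (min ds (ds - d)) 1).map
          (fun i => [i, i + d, w, dl])) []
        (fun acc d _ => PySem.List.foldl_append_singleton_eq_map _ _ acc)]
    exact PySem.List.foldl_append_eq_flatMap _ _ []
  show PySem.List.sorted2 ((PySem.List.pyRange (-(min (PySem.Int.floordiv nd 2) (ds - 1))) 0 1 ++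
        PySem.List.pyRange 1 (min (PySem.Int.floordiv nd 2) (ds - 1) + 1) 1).foldl
      (fun pairs d =>
        (PySem.List.pyRange (max 0 (-d)) (min ds (ds - d)) 1).foldl
          (fun pairs nid => pairs ++ [[nid, nid + d, w, dl]]) pairs) [])
      (fun r => PySem.List.pyGetD r 0 0) (fun r => PySem.List.pyGetD r 1 0) = _
  rw [hpairs]

-- sorted2 with Int keys is sorted with the lexicographic pair key
theorem pvSorted2_eq_sorted_lex {α : Type} (xs : List α) (k1 k2 : α → Int) :
    PySem.List.sorted2 xs k1 k2 = PySem.List.sorted xs (fun a => toLex (k1 a, k2 a)) := by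
  unfold PySem.List.sorted2 PySem.List.sorted
  have hb : (fun a b => decide (k1 a < k1 b) || (!decide (k1 b < k1 a) && decide (k2 a < k2 b)))
      = (fun a b : α => decide (toLex (k1 a, k2 a) < toLex (k1 b, k2 b))) := by
    funext a b
    by_cases h1 : k1 a < k1 b <;> by_cases h2 : k1 b < k1 a <;> by_cases h3 : k2 a < k2 b <;>
      simp [Prod.Lex.lt_iff, h1, h2, h3] <;> omega
  simp only [if_neg (by decide : ¬ (false = true))]
  rw [hb]

theorem pvAFlat_pairwise (ds h w dl : Int) :
    (pvAFlat ds h w dl).Pairwise (fun r s => pvKeyL r < pvKeyL s) := by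
  unfold pvAFlat
  rw [List.pairwise_flatMap]
  constructor
  · intro i _
    rw [List.pairwise_map]
    refine List.Pairwise.imp ?_
      (List.Pairwise.sublist List.filter_sublist (PySem.List.pairwise_lt_pyRange_one (-h) (h + 1)))
    intro t t' htt'
    simp only [pvKeyL, pvGet0, pvGet1, Prod.Lex.lt_iff]
    right
    constructor
    · rfl
    · simp only [ofLex_toLex]; omega
  · refine List.Pairwise.imp ?_ (PySem.List.pairwise_lt_pyRange_one 0 ds)
    intro i i' hii' x hx y hy
    simp only [List.mem_map, List.mem_filter] at hx hy
    obtain ⟨t, _, rfl⟩ := hx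
    obtain ⟨t', _, rfl⟩ := hy
    simp only [pvKeyL, pvGet0, pvGet1, Prod.Lex.lt_iff]
    left
    simpa using hii'

theorem pvBRaw_pairwise (ds h w dl : Int) :
    (pvBRaw ds h w dl).Pairwise (fun r s => pvKeyM r < pvKeyM s) := by
  unfold pvBRaw
  rw [List.pairwise_flatMap]
  constructor
  · intro d _
    rw [List.pairwise_map]
    refine List.Pairwise.imp ?_ (PySem.List.pairwise_lt_pyRange_one _ _)
    intro i i' hii'
    simp only [pvKeyM, pvGet0, pvGet1, Prod.Lex.lt_iff]
    right
    constructor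
    · simp only [ofLex_toLex]; omega
    · simpa using hii'
  · have hpw : (PySem.List.pyRange (-(min h (ds - 1))) 0 1 ++ PySem.List.pyRange 1 (min h (ds - 1) + 1) 1).Pairwise (· < ·) := by
      rw [List.pairwise_append]
      exact ⟨PySem.List.pairwise_lt_pyRange_one _ _, PySem.List.pairwise_lt_pyRange_one _ _,
        fun a ha b hb => by
          rw [PySem.List.mem_pyRange_one] at ha hb; omega⟩
    refine List.Pairwise.imp ?_ hpw
    intro d d' hdd' x hx y hy
    simp only [List.mem_map] at hx hy
    obtain ⟨i, _, rfl⟩ := hx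
    obtain ⟨i', _, rfl⟩ := hy
    simp only [pvKeyM, pvGet0, pvGet1, Prod.Lex.lt_iff]
    left
    simp only [ofLex_toLex]; omega

theorem pvNodup_of_pairwise_key {key : List Int → Lex (Int × Int)} {l : List (List Int)}
    (hp : l.Pairwise (fun r s => key r < key s)) : l.Nodup :=
  hp.imp (fun {a b} hab heq => absurd (heq ▸ hab) (lt_irrefl _))

theorem pvPerm_BA (ds h w dl : Int) : (pvBRaw ds h w dl).Perm (pvAFlat ds h w dl) := by
  rw [List.perm_ext_iff_of_nodup
      (pvNodup_of_pairwise_key (pvBRaw_pairwise ds h w dl))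
      (pvNodup_of_pairwise_key (pvAFlat_pairwise ds h w dl))]
  intro x
  unfold pvBRaw pvAFlat
  constructor
  · intro hx
    rw [List.mem_flatMap] at hx
    obtain ⟨d, hd, hx⟩ := hx
    rw [List.mem_map] at hx
    obtain ⟨i, hi, rfl⟩ := hx
    rw [List.mem_append, PySem.List.mem_pyRange_one, PySem.List.mem_pyRange_one] at hd
    rw [PySem.List.mem_pyRange_one] at hi
    rw [List.mem_flatMap]
    refine ⟨i, ?_, ?_⟩
    · rw [PySem.List.mem_pyRange_one]; omega
    · rw [List.mem_map]
      refine ⟨d, ?_, rfl⟩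
      rw [List.mem_filter, PySem.List.mem_pyRange_one]
      refine ⟨by omega, ?_⟩
      simp only [Bool.not_eq_eq_eq_not, Bool.not_true, Bool.or_eq_false_iff,
        decide_eq_false_iff_not, beq_eq_false_iff_ne, ne_eq, not_lt, not_le]
      omega
  · intro hx
    rw [List.mem_flatMap] at hx
    obtain ⟨i, hi, hx⟩ := hx
    rw [List.mem_map] at hx
    obtain ⟨t, ht, rfl⟩ := hx
    rw [PySem.List.mem_pyRange_one] at hi
    rw [List.mem_filter, PySem.List.mem_pyRange_one] at ht
    obtain ⟨ht1, ht2⟩ := ht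
    simp only [Bool.not_eq_eq_eq_not, Bool.not_true, Bool.or_eq_false_iff,
      decide_eq_false_iff_not, beq_eq_false_iff_ne, ne_eq, not_lt, not_le] at ht2
    rw [List.mem_flatMap]
    refine ⟨t, ?_, ?_⟩
    · rw [List.mem_append, PySem.List.mem_pyRange_one, PySem.List.mem_pyRange_one]; omega
    · rw [List.mem_map]
      refine ⟨i, ?_, rfl⟩
      rw [PySem.List.mem_pyRange_one]
      omega

-- ===== VERDICT (by name: the statement is the Claim_ definition above) =====
theorem output_pairing_connection_list_spec : Claim_equal_output_pairing_connection_list := by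
  intro ds nd w dl _
  unfold Spec_output_pairing_connection_list
  rw [pvA_eq, pvB_eq, pvSorted2_eq_sorted_lex]
  have hA : (pvAFlat ds (PySem.Int.floordiv nd 2) w dl).Pairwise
      (fun r s => (fun r => toLex (PySem.List.pyGetD r 0 0, PySem.List.pyGetD r 1 0)) r
                < (fun r => toLex (PySem.List.pyGetD r 0 0, PySem.List.pyGetD r 1 0)) s) :=
    pvAFlat_pairwise ds (PySem.Int.floordiv nd 2) w dl
  exact (PySem.List.sorted_eq_of_perm_of_pairwise_lt _ _ _
    (pvPerm_BA ds (PySem.Int.floordiv nd 2) w dl).symm hA).symm
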